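-- pv_equiv track=rewrite | github.com/awslabs/jndi-deobfuscate-python | src/jndi_deobfuscate/jndi_deobfuscate.py | _return_all_case_variations
-- ===== SOURCE A (Python) =====
-- import itertools
-- from typing import Dict, List, Tuple, Union
--
-- def _return_all_case_variations(input_string) -> List[str]:
--     "given a string, returns a list of strings, containing all combinations of uppercase/lowercase for that string"
--     return list(
--         map(
--             "".join,
--             itertools.product(
--                 *(sorted(set((character.upper(), character.lower()))) for character in input_string)
--             ),
--         )
--     )
-- ===== SOURCE B (Python) =====
-- def _return_all_case_variations(input_string):
--     "given a string, returns a list of strings, containing all combinations of uppercase/lowercase for that string"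
--     k = sum(1 for c in input_string if c.upper() != c.lower())
--     out = []
--     for mask in range(1 << k):
--         j = k
--         chars = []
--         for c in input_string:
--             if c.upper() != c.lower():
--                 j -= 1
--                 chars.append(c.lower() if (mask >> j) & 1 else c.upper())
--             else:
--                 chars.append(c.upper())
--         out.append("".join(chars))
--     return out
-- ===== Notes on version B (the rewrite author's own statement) =====
-- stated objective: alternative
-- what changed: Replaces itertools.product over per-character variant lists by direct bitmask enumeration: count the k case-varying characters, then for each integer mask in range(2**k) rebuild the string choosing lower when the corresponding bit (most significant first) is set, upper otherwise.
import Mathlib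
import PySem

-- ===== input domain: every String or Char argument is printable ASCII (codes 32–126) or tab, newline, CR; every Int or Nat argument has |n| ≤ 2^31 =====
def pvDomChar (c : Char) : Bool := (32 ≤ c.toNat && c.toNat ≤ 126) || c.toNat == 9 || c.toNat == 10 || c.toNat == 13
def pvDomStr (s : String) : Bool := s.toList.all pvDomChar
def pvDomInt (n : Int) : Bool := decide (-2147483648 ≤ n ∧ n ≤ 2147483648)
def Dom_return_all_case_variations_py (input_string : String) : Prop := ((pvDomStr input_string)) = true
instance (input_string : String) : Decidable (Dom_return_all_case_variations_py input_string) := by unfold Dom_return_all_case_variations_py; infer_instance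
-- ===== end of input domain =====

-- B enumerates the 2^k case assignments for the k case-varying characters as integer bitmasks
-- and rebuilds each string directly, instead of A's itertools.product over per-character
-- sorted variant lists; objective: alternative algorithm, same cost.


-- ===== PORT A =====
-- sorted(set((character.upper(), character.lower()))) for one character (each Python variant is a 1-char string)
def pvCaseVariants (c : Char) : List Char :=
  PySem.List.sorted (PySem.Set.ofList [PySem.Chars.upperChar c, PySem.Chars.lowerChar c]) (fun x => x) false

-- itertools.product(*lists): leftmost factor varies slowest
def pvProduct : List (List Char) → List (List Char)
  | [] => [[]]
  | l :: ls => l.flatMap (fun c => (pvProduct ls).map (fun t => c :: t))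

def return_all_case_variations_py (input_string : String) : List String :=
  (pvProduct (input_string.toList.map pvCaseVariants)).map (fun cs => String.ofList cs)

-- ===== PORT B =====
-- inner loop of Source B: walk the characters with bit pointer j (decremented before use at each
-- case-varying character), picking lower when bit j of mask is set, upper otherwise
def pvBuild (mask : Nat) : List Char → Nat → List Char
  | [], _ => []
  | c :: rest, j =>
      if PySem.Chars.upperChar c ≠ PySem.Chars.lowerChar c then
        (if (mask >>> (j - 1)) &&& 1 == 1 then PySem.Chars.lowerChar c else PySem.Chars.upperChar c)
          :: pvBuild mask rest (j - 1)
      else PySem.Chars.upperChar c :: pvBuild mask rest j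

def return_all_case_variations_py_alt (input_string : String) : List String :=
  let cs := input_string.toList
  let k := (cs.filter (fun c => PySem.Chars.upperChar c ≠ PySem.Chars.lowerChar c)).length
  (List.range (2 ^ k)).map (fun mask => String.ofList (pvBuild mask cs k))

-- ===== PRECONDITION & SPEC =====
def Spec_return_all_case_variations_py (input_string : String) (out : List String) : Prop := out = return_all_case_variations_py_alt input_string
instance (input_string : String) (out : List String) : Decidable (Spec_return_all_case_variations_py input_string out) := by unfold Spec_return_all_case_variations_py; infer_instance

-- ===== CLAIM (what is proved, stated in full; the proofs are below) =====
def Claim_equal_return_all_case_variations_py : Prop := ∀ (input_string : String), Dom_return_all_case_variations_py input_string → Spec_return_all_case_variations_py input_string (return_all_case_variations_py input_string)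

-- ===== LEMMAS AND PROOFS =====
-- number of case-varying characters
def pvCountV (cs : List Char) : Nat :=
  (cs.filter (fun c => PySem.Chars.upperChar c ≠ PySem.Chars.lowerChar c)).length

-- on ASCII (codes ≤ 126) the two case variants are already sorted: upper < lower when they differ
theorem pvVariants_fin : ∀ n : Fin 127, pvCaseVariants (Char.ofNat n.val) =
    (if PySem.Chars.upperChar (Char.ofNat n.val) = PySem.Chars.lowerChar (Char.ofNat n.val)
     then [PySem.Chars.upperChar (Char.ofNat n.val)]
     else [PySem.Chars.upperChar (Char.ofNat n.val), PySem.Chars.lowerChar (Char.ofNat n.val)]) := by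
  decide

theorem pvVariants_dom (c : Char) (h : pvDomChar c = true) : pvCaseVariants c =
    (if PySem.Chars.upperChar c = PySem.Chars.lowerChar c
     then [PySem.Chars.upperChar c]
     else [PySem.Chars.upperChar c, PySem.Chars.lowerChar c]) := by
  have hlt : c.toNat < 127 := by
    simp [pvDomChar] at h; omega
  have hc : Char.ofNat c.toNat = c := by
    simp [Char.ofNat_toNat]
  have := pvVariants_fin ⟨c.toNat, hlt⟩
  simpa [hc] using this

-- bit i of m + 2^t equals bit i of m when i < t
theorem pv_shift_bit (m t i : Nat) (h : i < t) : ((m + 2 ^ t) >>> i) % 2 = (m >>> i) % 2 := by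
  simp only [Nat.shiftRight_eq_div_pow]
  have h2 : 2 ^ t = 2 ^ (t - i) * 2 ^ i := by rw [← pow_add]; congr 1; omega
  rw [h2, Nat.add_mul_div_right _ _ (Nat.two_pow_pos i)]
  have h3 : 2 ^ (t - i) = 2 * 2 ^ (t - i - 1) := by rw [← pow_succ']; congr 1; omega
  omega

-- bits queried by pvBuild at pointer j = pvCountV cs all lie below j, so adding 2^t, t ≥ j, is invisible
theorem pvBuild_add_pow (cs : List Char) (m t : Nat) (h : pvCountV cs ≤ t) :
    pvBuild (m + 2 ^ t) cs (pvCountV cs) = pvBuild m cs (pvCountV cs) := by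
  induction cs generalizing m with
  | nil => rfl
  | cons c rest ih =>
      by_cases hv : PySem.Chars.upperChar c = PySem.Chars.lowerChar c
      · have hcv : pvCountV (c :: rest) = pvCountV rest := by
          simp [pvCountV, hv]
        rw [hcv] at h ⊢
        simp only [pvBuild, hv, ne_eq, not_true_eq_false, if_false]
        rw [ih m h]
      · have hcv : pvCountV (c :: rest) = pvCountV rest + 1 := by
          simp [pvCountV, hv]
        rw [hcv] at h ⊢
        have hbit : ((m + 2 ^ t) >>> pvCountV rest) % 2 = (m >>> pvCountV rest) % 2 :=
          pv_shift_bit m t (pvCountV rest) (by omega)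
        simp only [pvBuild, ne_eq, hv, not_false_eq_true, if_true, Nat.add_sub_cancel,
          Nat.and_one_is_mod, hbit]
        rw [ih m (by omega)]

-- main invariant: the product of the variant lists is exactly the bitmask enumeration
theorem pvProduct_eq_build (cs : List Char) (hdom : cs.all pvDomChar = true) :
    pvProduct (cs.map pvCaseVariants) =
      (List.range (2 ^ pvCountV cs)).map (fun m => pvBuild m cs (pvCountV cs)) := by
  induction cs with
  | nil => rfl
  | cons c rest ih =>
      simp only [List.all_cons, Bool.and_eq_true] at hdom
      obtain ⟨hc, hrest⟩ := hdom
      have IH := ih hrest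
      by_cases hv : PySem.Chars.upperChar c = PySem.Chars.lowerChar c
      · have hcv : pvCountV (c :: rest) = pvCountV rest := by simp [pvCountV, hv]
        simp only [List.map_cons, pvProduct, pvVariants_dom c hc, if_pos hv, IH, hcv,
          List.flatMap_cons, List.flatMap_nil, List.append_nil, List.map_map]
        apply List.map_congr_left
        intro m _
        simp [pvBuild, hv, Function.comp]
      · have hcv : pvCountV (c :: rest) = pvCountV rest + 1 := by simp [pvCountV, hv]
        set t := pvCountV rest with ht
        have hrange : List.range (2 ^ (t + 1)) =
            List.range (2 ^ t) ++ (List.range (2 ^ t)).map (fun m => 2 ^ t + m) := by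
          have : 2 ^ (t + 1) = 2 ^ t + 2 ^ t := by ring
          rw [this, List.range_add]
        simp only [List.map_cons, pvProduct, pvVariants_dom c hc, if_neg hv, IH, hcv, hrange,
          List.flatMap_cons, List.flatMap_nil, List.append_nil, List.map_map, List.map_append]
        congr 1
        · apply List.map_congr_left
          intro m hm
          have hmlt : m < 2 ^ t := List.mem_range.mp hm
          have hbit : (m >>> t) % 2 = 0 := by
            rw [Nat.shiftRight_eq_div_pow, Nat.div_eq_of_lt hmlt]
          simp [pvBuild, hv, hbit, Function.comp]
        · apply List.map_congr_left
          intro m hm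
          have hmlt : m < 2 ^ t := List.mem_range.mp hm
          have hbit : ((2 ^ t + m) >>> t) % 2 = 1 := by
            rw [Nat.shiftRight_eq_div_pow, Nat.add_comm,
              Nat.add_div_right _ (Nat.two_pow_pos t), Nat.div_eq_of_lt hmlt]
          have htail : pvBuild (2 ^ t + m) rest t = pvBuild m rest t := by
            rw [Nat.add_comm, ht]
            exact pvBuild_add_pow rest m t (le_refl _)
          simp [pvBuild, hv, hbit, Function.comp, htail]

-- ===== VERDICT (by name: the statement is the Claim_ definition above) =====
theorem return_all_case_variations_py_spec : Claim_equal_return_all_case_variations_py := by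
  intro s hdom
  unfold Spec_return_all_case_variations_py return_all_case_variations_py return_all_case_variations_py_alt
  have hdom' : s.toList.all pvDomChar = true := hdom
  rw [pvProduct_eq_build s.toList hdom']
  simp [pvCountV, List.map_map, Function.comp]
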